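-- pv_equiv track=rewrite | github.com/raimundoopazotoesca/Agente-Toesca | tools/rentroll_tools.py | _build_escalon_pairs
-- ===== SOURCE A (Python) =====
-- _ESCALON_NAMES = [
--     "1\n(UF/m2/mes)", "2\n(UF/m2/mes)", "3\n(UF/m2/mes)",
--     "4\n(UF/m2/mes)", "5\n(UF/m2/mes)",
-- ]
--
-- def _build_escalon_pairs(col_map: dict, fecha_positions: list) -> list:
--     """
--     Retorna lista de (nombre_escalon, idx_valor, idx_fecha) en orden.
--     idx_fecha es la primera posición de 'Fecha' > idx_valor.
--     """
--     pairs = []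
--     for name in _ESCALON_NAMES:
--         val_idx = col_map.get(name)
--         if val_idx is None:
--             continue
--         fecha_idx = next((f for f in sorted(fecha_positions) if f > val_idx), None)
--         pairs.append((name, val_idx, fecha_idx))
--     return pairs
-- ===== SOURCE B (Python) =====
-- _ESCALON_NAMES = [
--     "1\n(UF/m2/mes)", "2\n(UF/m2/mes)", "3\n(UF/m2/mes)",
--     "4\n(UF/m2/mes)", "5\n(UF/m2/mes)",
-- ]
--
-- def _build_escalon_pairs(col_map: dict, fecha_positions: list) -> list:
--     """Same result without sorting: the first sorted date > v is min of dates > v."""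
--     def first_after(v):
--         later = [f for f in fecha_positions if f > v]
--         return min(later) if later else None
--     return [(name, col_map[name], first_after(col_map[name]))
--             for name in _ESCALON_NAMES if name in col_map]
-- ===== Notes on version B (the rewrite author's own statement) =====
-- stated objective: simpler
-- what changed: Replaces the per-name sort-then-scan (sorted(fecha_positions) rebuilt for every escalon name) with a sort-free one-line filter+min, and the accumulator loop with a comprehension.
import Mathlib
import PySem

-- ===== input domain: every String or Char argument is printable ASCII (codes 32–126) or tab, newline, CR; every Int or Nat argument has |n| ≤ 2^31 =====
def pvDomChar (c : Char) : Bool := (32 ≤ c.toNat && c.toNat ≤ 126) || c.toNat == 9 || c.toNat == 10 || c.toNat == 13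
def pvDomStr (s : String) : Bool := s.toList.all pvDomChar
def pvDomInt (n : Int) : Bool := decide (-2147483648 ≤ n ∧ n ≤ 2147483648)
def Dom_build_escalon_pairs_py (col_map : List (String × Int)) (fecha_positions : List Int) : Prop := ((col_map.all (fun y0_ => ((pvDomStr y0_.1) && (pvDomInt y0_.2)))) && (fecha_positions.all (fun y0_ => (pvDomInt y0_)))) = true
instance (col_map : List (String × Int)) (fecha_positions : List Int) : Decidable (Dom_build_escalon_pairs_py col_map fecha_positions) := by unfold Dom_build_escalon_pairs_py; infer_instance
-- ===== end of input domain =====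

-- B replaces A's per-name sort-then-scan with a sort-free filter+min (the first sorted date > v is min of the dates > v) and the accumulator loop with a comprehension.

def pvEscalonNames : List String :=
  ["1\n(UF/m2/mes)", "2\n(UF/m2/mes)", "3\n(UF/m2/mes)",
   "4\n(UF/m2/mes)", "5\n(UF/m2/mes)"]

-- ===== PORT A =====
def build_escalon_pairs_py (col_map : List (String × Int)) (fecha_positions : List Int) : List (String × Int × Option Int) :=
  pvEscalonNames.foldl (fun pairs name =>
    match (PySem.Dict.mk col_map).get? name with
    | none => pairs
    | some val_idx =>
        let fecha_idx := (PySem.List.sorted fecha_positions (fun x => x) false).find? (fun f => decide (val_idx < f))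
        pairs ++ [(name, val_idx, fecha_idx)]) []

-- ===== PORT B =====
def pvFirstAfter (fecha_positions : List Int) (v : Int) : Option Int :=
  let later := fecha_positions.filter (fun f => decide (v < f))
  if later.isEmpty then none else PySem.List.min? later (fun x => x)

def build_escalon_pairs_py_alt (col_map : List (String × Int)) (fecha_positions : List Int) : List (String × Int × Option Int) :=
  pvEscalonNames.filterMap (fun name =>
    match (PySem.Dict.mk col_map).get? name with
    | none => none
    | some v => some (name, v, pvFirstAfter fecha_positions v))

-- ===== PRECONDITION & SPEC =====
def Spec_build_escalon_pairs_py (col_map : List (String × Int)) (fecha_positions : List Int) (out : List (String × Int × Option Int)) : Prop := out = build_escalon_pairs_py_alt col_map fecha_positions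
instance (col_map : List (String × Int)) (fecha_positions : List Int) (out : List (String × Int × Option Int)) : Decidable (Spec_build_escalon_pairs_py col_map fecha_positions out) := by unfold Spec_build_escalon_pairs_py; infer_instance

-- ===== CLAIM (what is proved, stated in full; the proofs are below) =====
def Claim_equal_build_escalon_pairs_py : Prop := ∀ (col_map : List (String × Int)) (fecha_positions : List Int), Dom_build_escalon_pairs_py col_map fecha_positions → Spec_build_escalon_pairs_py col_map fecha_positions (build_escalon_pairs_py col_map fecha_positions)

-- ===== LEMMAS AND PROOFS =====

-- foldl min with a start below every element returns the start
theorem foldl_min_of_forall_le (x : Int) (ts : List Int) (h : ∀ y ∈ ts, x ≤ y) :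
    ts.foldl min x = x := by
  induction ts with
  | nil => rfl
  | cons a t ih =>
    have hxa : x ≤ a := h a (by simp)
    simp only [List.foldl_cons, min_eq_left hxa]
    exact ih (fun y hy => h y (by simp [hy]))

-- min? (id key) is invariant under permutation
theorem min?_id_perm (xs ys : List Int) (h : xs.Perm ys) :
    PySem.List.min? xs (fun x => x) = PySem.List.min? ys (fun x => x) := by
  cases hxs : PySem.List.min? xs (fun x => x) with
  | none =>
    have : xs = [] := (PySem.List.min?_eq_none_iff _ _).1 hxs
    subst this
    have : ys = [] := h.nil_eq.symm
    simp [this, PySem.List.min?]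
  | some m =>
    cases hys : PySem.List.min? ys (fun x => x) with
    | none =>
      have : ys = [] := (PySem.List.min?_eq_none_iff _ _).1 hys
      subst this
      have : xs = [] := h.eq_nil
      subst this
      simp [PySem.List.min?] at hxs
    | some m' =>
      have hm : m ∈ xs := PySem.List.min?_mem hxs
      have hm' : m' ∈ ys := PySem.List.min?_mem hys
      have h1 : m ≤ m' := PySem.List.min?_isMin hxs m' (h.symm.subset hm')
      have h2 : m' ≤ m := PySem.List.min?_isMin hys m (h.subset hm)
      simp [le_antisymm h1 h2]

-- on an ascending list, the first element > v is the minimum of the elements > v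
theorem sorted_find?_eq (l : List Int) (v : Int) (h : l.Pairwise (· ≤ ·)) :
    l.find? (fun f => decide (v < f)) =
      (if (l.filter (fun f => decide (v < f))).isEmpty then none
       else PySem.List.min? (l.filter (fun f => decide (v < f))) (fun x => x)) := by
  induction l with
  | nil => rfl
  | cons x t ih =>
    rcases List.pairwise_cons.1 h with ⟨hx, ht⟩
    by_cases hvx : v < x
    · have hmem : ∀ y ∈ t.filter (fun f => decide (v < f)), x ≤ y := by
        intro y hy
        exact hx y (List.mem_of_mem_filter hy)
      simp only [List.find?_cons, List.filter_cons, hvx, if_pos,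
        decide_true, List.isEmpty_cons, PySem.List.min?_id_cons, Bool.false_eq_true,
        if_false, foldl_min_of_forall_le x _ hmem]
    · simp only [List.find?_cons, List.filter_cons, hvx, decide_false,
        if_false, Bool.false_eq_true]
      exact ih ht

-- A's per-name date search equals B's filter+min
theorem find?_sorted_eq_firstAfter (fp : List Int) (v : Int) :
    (PySem.List.sorted fp (fun x => x) false).find? (fun f => decide (v < f)) =
      pvFirstAfter fp v := by
  have hperm : (PySem.List.sorted fp (fun x => x) false).Perm fp := PySem.List.sorted_perm fp _ _
  have hpair : (PySem.List.sorted fp (fun x => x) false).Pairwise (· ≤ ·) := by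
    have := PySem.List.sorted_pairwise (xs := fp) (key := fun x => x)
    simpa using this
  rw [sorted_find?_eq _ v hpair]
  have hfperm : ((PySem.List.sorted fp (fun x => x) false).filter (fun f => decide (v < f))).Perm
      (fp.filter (fun f => decide (v < f))) := hperm.filter _
  unfold pvFirstAfter
  rw [min?_id_perm _ _ hfperm]
  have hE : ((PySem.List.sorted fp (fun x => x) false).filter (fun f => decide (v < f))).length
      = (fp.filter (fun f => decide (v < f))).length := hfperm.length_eq
  simp only [List.isEmpty_iff_length_eq_zero, hE]

-- the accumulator loop over names is the filterMap
theorem foldl_eq_filterMap (g : String → Option Int) (F1 F2 : Int → Option Int)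
    (hF : ∀ v, F1 v = F2 v) :
    ∀ (names : List String) (acc : List (String × Int × Option Int)),
      names.foldl (fun pairs name =>
        match g name with
        | none => pairs
        | some val_idx => pairs ++ [(name, val_idx, F1 val_idx)]) acc
      = acc ++ names.filterMap (fun name =>
          match g name with
          | none => none
          | some v => some (name, v, F2 v)) := by
  intro names
  induction names with
  | nil => intro acc; simp
  | cons n t ih =>
    intro acc
    cases hg : g n with
    | none => simp [List.foldl_cons, hg, ih]
    | some v => simp [List.foldl_cons, hg, ih, hF v]

-- ===== VERDICT (by name: the statement is the Claim_ definition above) =====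
theorem build_escalon_pairs_py_spec : Claim_equal_build_escalon_pairs_py := by
  intro col_map fecha_positions _
  unfold Spec_build_escalon_pairs_py build_escalon_pairs_py build_escalon_pairs_py_alt
  rw [foldl_eq_filterMap ((PySem.Dict.mk col_map).get?)
    (fun v => (PySem.List.sorted fecha_positions (fun x => x) false).find? (fun f => decide (v < f)))
    (pvFirstAfter fecha_positions)
    (fun v => find?_sorted_eq_firstAfter fecha_positions v)]
  simp
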